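-- pv_equiv track=rewrite | github.com/vanditasingh12/QuantFlux | config/config.py | detect_market
-- ===== SOURCE A (Python) =====
-- def detect_market(benchmark_index, tickers):
--     market_info = {"name": "Custom Market", "currency": "$", "region": "Unknown"}
--
--     benchmark_map = {
--         '^NSEI': {"name": "NIFTY 50", "currency": "₹", "region": "India"},
--         '^SPX': {"name": "S&P 500", "currency": "$", "region": "US"},
--         '^GSPC': {"name": "S&P 500", "currency": "$", "region": "US"},
--         '^DJI': {"name": "Dow Jones", "currency": "$", "region": "US"},
--         '^IXIC': {"name": "NASDAQ", "currency": "$", "region": "US"},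
--         '^STOXX50E': {"name": "Euro Stoxx 50", "currency": "€", "region": "Europe"},
--         '^FTSE': {"name": "FTSE 100", "currency": "£", "region": "UK"},
--         '^N225': {"name": "Nikkei 225", "currency": "¥", "region": "Japan"},
--         '^HSI': {"name": "Hang Seng", "currency": "HK$", "region": "Hong Kong"},
--         '^AXJO': {"name": "ASX 200", "currency": "A$", "region": "Australia"},
--     }
--
--     if benchmark_index in benchmark_map:
--         market_info.update(benchmark_map[benchmark_index])
--     else:
--         if any(ticker.endswith('.NS') for ticker in tickers):
--             market_info = {"name": "Indian Market", "currency": "₹", "region": "India"}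
--         elif any(ticker.endswith('.L') for ticker in tickers):
--             market_info = {"name": "UK Market", "currency": "£", "region": "UK"}
--         elif any(ticker.endswith('.T') for ticker in tickers):
--             market_info = {"name": "Japanese Market", "currency": "¥", "region": "Japan"}
--         elif any(ticker.endswith('.AS') or ticker.endswith('.PA') or ticker.endswith('.DE') for ticker in tickers):
--             market_info = {"name": "European Market", "currency": "€", "region": "Europe"}
--     return market_info
-- ===== SOURCE B (Python) =====
-- _BENCH = {
--     '^NSEI': ("NIFTY 50", "₹", "India"),
--     '^SPX': ("S&P 500", "$", "US"),
--     '^GSPC': ("S&P 500", "$", "US"),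
--     '^DJI': ("Dow Jones", "$", "US"),
--     '^IXIC': ("NASDAQ", "$", "US"),
--     '^STOXX50E': ("Euro Stoxx 50", "€", "Europe"),
--     '^FTSE': ("FTSE 100", "£", "UK"),
--     '^N225': ("Nikkei 225", "¥", "Japan"),
--     '^HSI': ("Hang Seng", "HK$", "Hong Kong"),
--     '^AXJO': ("ASX 200", "A$", "Australia"),
-- }
--
-- _SUFFIXES = [('.NS', 0), ('.L', 1), ('.T', 2), ('.AS', 3), ('.PA', 3), ('.DE', 3)]
--
-- _FALLBACK = [
--     ("Indian Market", "₹", "India"),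
--     ("UK Market", "£", "UK"),
--     ("Japanese Market", "¥", "Japan"),
--     ("European Market", "€", "Europe"),
--     ("Custom Market", "$", "Unknown"),
-- ]
--
--
-- def _rank(t):
--     for suf, r in _SUFFIXES:
--         if t.endswith(suf):
--             return r
--     return 4
--
--
-- def detect_market(benchmark_index, tickers):
--     triple = _BENCH.get(benchmark_index)
--     if triple is None:
--         best = 4
--         for t in tickers:
--             best = min(best, _rank(t))
--         triple = _FALLBACK[best]
--     name, currency, region = triple
--     return {"name": name, "currency": currency, "region": region}
-- ===== Notes on version B (the rewrite author's own statement) =====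
-- stated objective: alternative
-- what changed: Replaced A's four repeated any()-scans in elif priority order by a single fold over tickers that maintains the minimum suffix-priority rank (NS=0, L=1, T=2, AS/PA/DE=3, no match=4) and indexes a fallback table of (name,currency,region) triples with it; benchmark hits look up a triple table instead of update()-merging dicts.
import Mathlib
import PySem

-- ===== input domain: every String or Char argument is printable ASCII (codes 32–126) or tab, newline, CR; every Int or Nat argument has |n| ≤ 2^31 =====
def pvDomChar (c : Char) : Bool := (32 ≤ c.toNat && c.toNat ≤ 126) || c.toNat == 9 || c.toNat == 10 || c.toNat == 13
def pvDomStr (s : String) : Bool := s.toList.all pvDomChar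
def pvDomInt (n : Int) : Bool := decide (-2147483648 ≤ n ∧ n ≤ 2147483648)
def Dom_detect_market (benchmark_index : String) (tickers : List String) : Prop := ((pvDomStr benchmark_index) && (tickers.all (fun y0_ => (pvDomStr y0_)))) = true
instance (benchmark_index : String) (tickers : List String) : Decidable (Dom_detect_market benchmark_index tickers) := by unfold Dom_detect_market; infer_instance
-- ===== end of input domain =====

-- B replaces A's four priority-ordered any()-scans by one fold keeping the minimum
-- suffix-priority rank, indexed into a triple table; objective: alternative.

-- ===== PORT A =====
def aDefault : PySem.Dict String String :=
  PySem.Dict.ofList [("name", "Custom Market"), ("currency", "$"), ("region", "Unknown")]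

def aBenchmarkMap : PySem.Dict String (PySem.Dict String String) :=
  PySem.Dict.ofList [
    ("^NSEI", PySem.Dict.ofList [("name", "NIFTY 50"), ("currency", "₹"), ("region", "India")]),
    ("^SPX", PySem.Dict.ofList [("name", "S&P 500"), ("currency", "$"), ("region", "US")]),
    ("^GSPC", PySem.Dict.ofList [("name", "S&P 500"), ("currency", "$"), ("region", "US")]),
    ("^DJI", PySem.Dict.ofList [("name", "Dow Jones"), ("currency", "$"), ("region", "US")]),
    ("^IXIC", PySem.Dict.ofList [("name", "NASDAQ"), ("currency", "$"), ("region", "US")]),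
    ("^STOXX50E", PySem.Dict.ofList [("name", "Euro Stoxx 50"), ("currency", "€"), ("region", "Europe")]),
    ("^FTSE", PySem.Dict.ofList [("name", "FTSE 100"), ("currency", "£"), ("region", "UK")]),
    ("^N225", PySem.Dict.ofList [("name", "Nikkei 225"), ("currency", "¥"), ("region", "Japan")]),
    ("^HSI", PySem.Dict.ofList [("name", "Hang Seng"), ("currency", "HK$"), ("region", "Hong Kong")]),
    ("^AXJO", PySem.Dict.ofList [("name", "ASX 200"), ("currency", "A$"), ("region", "Australia")])]

def detect_market (benchmark_index : String) (tickers : List String) : List (String × String) :=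
  let market_info := aDefault
  let market_info :=
    if aBenchmarkMap.contains benchmark_index then
      market_info.update (aBenchmarkMap.getD benchmark_index PySem.Dict.empty).items
    else if tickers.any (fun t => PySem.Str.endswith t ".NS") then
      PySem.Dict.ofList [("name", "Indian Market"), ("currency", "₹"), ("region", "India")]
    else if tickers.any (fun t => PySem.Str.endswith t ".L") then
      PySem.Dict.ofList [("name", "UK Market"), ("currency", "£"), ("region", "UK")]
    else if tickers.any (fun t => PySem.Str.endswith t ".T") then
      PySem.Dict.ofList [("name", "Japanese Market"), ("currency", "¥"), ("region", "Japan")]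
    else if tickers.any (fun t => PySem.Str.endswith t ".AS" || PySem.Str.endswith t ".PA" || PySem.Str.endswith t ".DE") then
      PySem.Dict.ofList [("name", "European Market"), ("currency", "€"), ("region", "Europe")]
    else market_info
  market_info.items

-- ===== PORT B =====
def bBench : PySem.Dict String (String × String × String) :=
  PySem.Dict.ofList [
    ("^NSEI", ("NIFTY 50", "₹", "India")),
    ("^SPX", ("S&P 500", "$", "US")),
    ("^GSPC", ("S&P 500", "$", "US")),
    ("^DJI", ("Dow Jones", "$", "US")),
    ("^IXIC", ("NASDAQ", "$", "US")),
    ("^STOXX50E", ("Euro Stoxx 50", "€", "Europe")),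
    ("^FTSE", ("FTSE 100", "£", "UK")),
    ("^N225", ("Nikkei 225", "¥", "Japan")),
    ("^HSI", ("Hang Seng", "HK$", "Hong Kong")),
    ("^AXJO", ("ASX 200", "A$", "Australia"))]

def bSuffixes : List (String × Nat) :=
  [(".NS", 0), (".L", 1), (".T", 2), (".AS", 3), (".PA", 3), (".DE", 3)]

def bFallback : List (String × String × String) :=
  [("Indian Market", "₹", "India"),
   ("UK Market", "£", "UK"),
   ("Japanese Market", "¥", "Japan"),
   ("European Market", "€", "Europe"),
   ("Custom Market", "$", "Unknown")]

-- first matching suffix's rank, 4 if no suffix matches (Python _rank's early-return loop)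
def bRank (t : String) : Nat :=
  match bSuffixes.find? (fun p => PySem.Str.endswith t p.1) with
  | some (_, r) => r
  | none => 4

def detect_market_alt (benchmark_index : String) (tickers : List String) : List (String × String) :=
  let triple :=
    match bBench.get? benchmark_index with
    | some tr => tr
    | none => bFallback.getD (tickers.foldl (fun best t => min best (bRank t)) 4) ("", "", "")
  [("name", triple.1), ("currency", triple.2.1), ("region", triple.2.2)]

-- ===== PRECONDITION & SPEC =====
def Spec_detect_market (benchmark_index : String) (tickers : List String) (out : List (String × String)) : Prop := out = detect_market_alt benchmark_index tickers
instance (benchmark_index : String) (tickers : List String) (out : List (String × String)) : Decidable (Spec_detect_market benchmark_index tickers out) := by unfold Spec_detect_market; infer_instance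

-- ===== CLAIM (what is proved, stated in full; the proofs are below) =====
def Claim_equal_detect_market : Prop := ∀ (benchmark_index : String) (tickers : List String), Dom_detect_market benchmark_index tickers → Spec_detect_market benchmark_index tickers (detect_market benchmark_index tickers)

-- ===== LEMMAS AND PROOFS =====

lemma bRank_unfold (t : String) :
    bRank t =
      if PySem.Str.endswith t ".NS" then 0
      else if PySem.Str.endswith t ".L" then 1
      else if PySem.Str.endswith t ".T" then 2
      else if PySem.Str.endswith t ".AS" then 3
      else if PySem.Str.endswith t ".PA" then 3
      else if PySem.Str.endswith t ".DE" then 3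
      else 4 := by
  simp only [bRank, bSuffixes, List.find?]
  split_ifs <;> simp_all

lemma foldl_min_le_iff (l : List String) (a k : Nat) :
    l.foldl (fun best t => min best (bRank t)) a ≤ k ↔ a ≤ k ∨ ∃ t ∈ l, bRank t ≤ k := by
  induction l generalizing a with
  | nil => simp
  | cons x xs ih =>
    simp [List.foldl_cons, ih]
    tauto

lemma rank_NS (t : String) (h : PySem.Str.endswith t ".NS" = true) : bRank t ≤ 0 := by
  rw [bRank_unfold, if_pos h]

lemma rank_L (t : String) (h : PySem.Str.endswith t ".L" = true) : bRank t ≤ 1 := by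
  rw [bRank_unfold]
  split_ifs <;> omega

lemma rank_T (t : String) (h : PySem.Str.endswith t ".T" = true) : bRank t ≤ 2 := by
  rw [bRank_unfold]
  split_ifs <;> omega

lemma rank_EU (t : String)
    (h : (PySem.Str.endswith t ".AS" || PySem.Str.endswith t ".PA" || PySem.Str.endswith t ".DE") = true) :
    bRank t ≤ 3 := by
  rw [bRank_unfold]
  split_ifs <;> first | omega | (simp only [Bool.or_eq_true] at h; tauto)

lemma rank_inv (t : String) (k : Nat) (hk : k ≤ 3) (hr : bRank t ≤ k) :
    (PySem.Str.endswith t ".NS" = true) ∨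
    (1 ≤ k ∧ PySem.Str.endswith t ".L" = true) ∨
    (2 ≤ k ∧ PySem.Str.endswith t ".T" = true) ∨
    (3 ≤ k ∧ (PySem.Str.endswith t ".AS" || PySem.Str.endswith t ".PA" || PySem.Str.endswith t ".DE") = true) := by
  rw [bRank_unfold] at hr
  split_ifs at hr with e1 e2 e3 e4 e5 e6
  · exact Or.inl e1
  · exact Or.inr (Or.inl ⟨hr, e2⟩)
  · exact Or.inr (Or.inr (Or.inl ⟨hr, e3⟩))
  · exact Or.inr (Or.inr (Or.inr ⟨hr, by rw [Bool.or_eq_true, Bool.or_eq_true]; exact Or.inl (Or.inl e4)⟩))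
  · exact Or.inr (Or.inr (Or.inr ⟨hr, by rw [Bool.or_eq_true, Bool.or_eq_true]; exact Or.inl (Or.inr e5)⟩))
  · exact Or.inr (Or.inr (Or.inr ⟨hr, by rw [Bool.or_eq_true]; exact Or.inr e6⟩))
  · omega

lemma best_cases (tickers : List String) :
    tickers.foldl (fun best t => min best (bRank t)) 4 =
      if tickers.any (fun t => PySem.Str.endswith t ".NS") then 0
      else if tickers.any (fun t => PySem.Str.endswith t ".L") then 1
      else if tickers.any (fun t => PySem.Str.endswith t ".T") then 2
      else if tickers.any (fun t => PySem.Str.endswith t ".AS" || PySem.Str.endswith t ".PA" || PySem.Str.endswith t ".DE") then 3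
      else 4 := by
  set b := tickers.foldl (fun best t => min best (bRank t)) 4 with hb
  have hub : ∀ k, (∃ t ∈ tickers, bRank t ≤ k) → b ≤ k := fun k h =>
    (foldl_min_le_iff tickers 4 k).mpr (Or.inr h)
  have hlb : ∀ k, k ≤ 3 → b ≤ k →
      (tickers.any (fun t => PySem.Str.endswith t ".NS") = true) ∨
      (1 ≤ k ∧ tickers.any (fun t => PySem.Str.endswith t ".L") = true) ∨
      (2 ≤ k ∧ tickers.any (fun t => PySem.Str.endswith t ".T") = true) ∨
      (3 ≤ k ∧ tickers.any (fun t => PySem.Str.endswith t ".AS" || PySem.Str.endswith t ".PA" || PySem.Str.endswith t ".DE") = true) := by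
    intro k hk h
    rcases (foldl_min_le_iff tickers 4 k).mp h with h4 | ⟨u, hu, hr⟩
    · omega
    · rcases rank_inv u k hk hr with e | ⟨hk1, e⟩ | ⟨hk2, e⟩ | ⟨hk3, e⟩
      · exact Or.inl (List.any_eq_true.mpr ⟨u, hu, e⟩)
      · exact Or.inr (Or.inl ⟨hk1, List.any_eq_true.mpr ⟨u, hu, e⟩⟩)
      · exact Or.inr (Or.inr (Or.inl ⟨hk2, List.any_eq_true.mpr ⟨u, hu, e⟩⟩))
      · exact Or.inr (Or.inr (Or.inr ⟨hk3, List.any_eq_true.mpr ⟨u, hu, e⟩⟩))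
  have hb4 : b ≤ 4 := (foldl_min_le_iff tickers 4 4).mpr (Or.inl le_rfl)
  split_ifs with h1 h2 h3 h4
  · obtain ⟨t, ht, he⟩ := List.any_eq_true.mp h1
    have := hub 0 ⟨t, ht, rank_NS t he⟩
    omega
  · obtain ⟨t, ht, he⟩ := List.any_eq_true.mp h2
    have h0 : b ≤ 1 := hub 1 ⟨t, ht, rank_L t he⟩
    have hn : ¬ b ≤ 0 := fun hc => by
      rcases hlb 0 (by omega) hc with e | ⟨hk, _⟩ | ⟨hk, _⟩ | ⟨hk, _⟩ <;> first | exact h1 e | omega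
    omega
  · obtain ⟨t, ht, he⟩ := List.any_eq_true.mp h3
    have h0 : b ≤ 2 := hub 2 ⟨t, ht, rank_T t he⟩
    have hn : ¬ b ≤ 1 := fun hc => by
      rcases hlb 1 (by omega) hc with e | ⟨_, e⟩ | ⟨hk, _⟩ | ⟨hk, _⟩ <;>
        first | exact h1 e | exact h2 e | omega
    omega
  · obtain ⟨t, ht, he⟩ := List.any_eq_true.mp h4
    have h0 : b ≤ 3 := hub 3 ⟨t, ht, rank_EU t he⟩
    have hn : ¬ b ≤ 2 := fun hc => by
      rcases hlb 2 (by omega) hc with e | ⟨_, e⟩ | ⟨_, e⟩ | ⟨hk, _⟩ <;>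
        first | exact h1 e | exact h2 e | exact h3 e | omega
    omega
  · have hn : ¬ b ≤ 3 := fun hc => by
      rcases hlb 3 (by omega) hc with e | ⟨_, e⟩ | ⟨_, e⟩ | ⟨_, e⟩ <;>
        first | exact h1 e | exact h2 e | exact h3 e | exact h4 e
    omega

lemma miss_case (bi : String) (tickers : List String)
    (h1 : bi ≠ "^NSEI") (h2 : bi ≠ "^SPX") (h3 : bi ≠ "^GSPC") (h4 : bi ≠ "^DJI") (h5 : bi ≠ "^IXIC")
    (h6 : bi ≠ "^STOXX50E") (h7 : bi ≠ "^FTSE") (h8 : bi ≠ "^N225") (h9 : bi ≠ "^HSI") (h10 : bi ≠ "^AXJO") :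
    detect_market bi tickers = detect_market_alt bi tickers := by
  have ga : aBenchmarkMap.get? bi = none := by
    rw [show aBenchmarkMap = PySem.Dict.mk [
      ("^NSEI", PySem.Dict.ofList [("name", "NIFTY 50"), ("currency", "₹"), ("region", "India")]),
      ("^SPX", PySem.Dict.ofList [("name", "S&P 500"), ("currency", "$"), ("region", "US")]),
      ("^GSPC", PySem.Dict.ofList [("name", "S&P 500"), ("currency", "$"), ("region", "US")]),
      ("^DJI", PySem.Dict.ofList [("name", "Dow Jones"), ("currency", "$"), ("region", "US")]),
      ("^IXIC", PySem.Dict.ofList [("name", "NASDAQ"), ("currency", "$"), ("region", "US")]),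
      ("^STOXX50E", PySem.Dict.ofList [("name", "Euro Stoxx 50"), ("currency", "€"), ("region", "Europe")]),
      ("^FTSE", PySem.Dict.ofList [("name", "FTSE 100"), ("currency", "£"), ("region", "UK")]),
      ("^N225", PySem.Dict.ofList [("name", "Nikkei 225"), ("currency", "¥"), ("region", "Japan")]),
      ("^HSI", PySem.Dict.ofList [("name", "Hang Seng"), ("currency", "HK$"), ("region", "Hong Kong")]),
      ("^AXJO", PySem.Dict.ofList [("name", "ASX 200"), ("currency", "A$"), ("region", "Australia")])] from by rfl]
    simp only [PySem.Dict.get?_mk_cons, beq_iff_eq, Ne.symm h1, Ne.symm h2, Ne.symm h3,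
      Ne.symm h4, Ne.symm h5, Ne.symm h6, Ne.symm h7, Ne.symm h8, Ne.symm h9, Ne.symm h10,
      if_false]
    exact PySem.Dict.get?_empty bi
  have ea : aBenchmarkMap.contains bi = false := by
    rw [PySem.Dict.contains_eq_isSome_get?, ga]; rfl
  have eb : bBench.get? bi = none := by
    rw [show bBench = PySem.Dict.mk [
      ("^NSEI", ("NIFTY 50", "₹", "India")),
      ("^SPX", ("S&P 500", "$", "US")),
      ("^GSPC", ("S&P 500", "$", "US")),
      ("^DJI", ("Dow Jones", "$", "US")),
      ("^IXIC", ("NASDAQ", "$", "US")),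
      ("^STOXX50E", ("Euro Stoxx 50", "€", "Europe")),
      ("^FTSE", ("FTSE 100", "£", "UK")),
      ("^N225", ("Nikkei 225", "¥", "Japan")),
      ("^HSI", ("Hang Seng", "HK$", "Hong Kong")),
      ("^AXJO", ("ASX 200", "A$", "Australia"))] from by rfl]
    simp only [PySem.Dict.get?_mk_cons, beq_iff_eq, Ne.symm h1, Ne.symm h2, Ne.symm h3,
      Ne.symm h4, Ne.symm h5, Ne.symm h6, Ne.symm h7, Ne.symm h8, Ne.symm h9, Ne.symm h10,
      if_false]
    exact PySem.Dict.get?_empty bi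
  rw [detect_market, detect_market_alt, eb, ea]
  simp only [Bool.false_eq_true, if_false, best_cases tickers]
  split_ifs <;> decide

-- ===== VERDICT (by name: the statement is the Claim_ definition above) =====
theorem detect_market_spec : Claim_equal_detect_market := by
  intro bi tickers _
  unfold Spec_detect_market
  by_cases h1 : bi = "^NSEI"; · subst h1; rfl
  by_cases h2 : bi = "^SPX"; · subst h2; rfl
  by_cases h3 : bi = "^GSPC"; · subst h3; rfl
  by_cases h4 : bi = "^DJI"; · subst h4; rfl
  by_cases h5 : bi = "^IXIC"; · subst h5; rfl
  by_cases h6 : bi = "^STOXX50E"; · subst h6; rfl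
  by_cases h7 : bi = "^FTSE"; · subst h7; rfl
  by_cases h8 : bi = "^N225"; · subst h8; rfl
  by_cases h9 : bi = "^HSI"; · subst h9; rfl
  by_cases h10 : bi = "^AXJO"; · subst h10; rfl
  exact miss_case bi tickers h1 h2 h3 h4 h5 h6 h7 h8 h9 h10
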